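-- pv_equiv track=rewrite | github.com/N-jongsik/CodingPractice | 프로그래머스/unrated/181926. 수 조작하기 1/수 조작하기 1.py | solution
-- ===== SOURCE A (Python) =====
-- def solution(n, control):
--     answer = 0
--     for i in control:
--         if "w" == i:
--             answer+=1
--         elif "s" == i:
--             answer+= -1
--         elif "d" == i:
--             answer+=10
--         else:
--             answer+=-10
--     return answer+n
-- ===== SOURCE B (Python) =====
-- def solution(n, control):
--     w = control.count('w')
--     s = control.count('s')
--     d = control.count('d')
--     other = len(control) - w - s - d
--     return n + w - s + 10 * d - 10 * other
-- ===== Notes on version B (the rewrite author's own statement) =====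
-- stated objective: faster
-- what changed: Replaces the single accumulating loop with per-character branching by counting passes (str.count for 'w','s','d', the remaining characters via the length complement) combined in one closed-form expression.
import Mathlib
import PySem

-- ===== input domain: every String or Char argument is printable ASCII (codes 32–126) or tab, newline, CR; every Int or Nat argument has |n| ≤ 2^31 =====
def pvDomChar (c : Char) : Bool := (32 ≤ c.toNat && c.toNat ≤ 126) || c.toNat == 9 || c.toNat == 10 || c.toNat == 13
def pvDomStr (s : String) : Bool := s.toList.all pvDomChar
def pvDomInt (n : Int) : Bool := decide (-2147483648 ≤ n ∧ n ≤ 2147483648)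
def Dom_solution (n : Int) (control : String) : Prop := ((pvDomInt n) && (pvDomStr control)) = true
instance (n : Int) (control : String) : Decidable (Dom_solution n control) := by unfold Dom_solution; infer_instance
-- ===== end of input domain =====

-- B replaces A's single accumulating loop by counting passes (str.count per control character, else-branch via length complement) combined in a closed form; a timing run measured B faster (constant factor).

-- ===== PORT A =====
def solution (n : Int) (control : String) : Int :=
  let answer : Int :=
    control.toList.foldl
      (fun answer i =>
        if 'w' = i then answer + 1
        else if 's' = i then answer + (-1)
        else if 'd' = i then answer + 10
        else answer + (-10)) 0
  answer + n

-- ===== PORT B =====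
def solution_alt (n : Int) (control : String) : Int :=
  let w : Int := PySem.Str.count control "w"
  let s : Int := PySem.Str.count control "s"
  let d : Int := PySem.Str.count control "d"
  let other : Int := (PySem.Str.len control : Int) - w - s - d
  n + w - s + 10 * d - 10 * other

-- ===== PRECONDITION & SPEC =====
def Spec_solution (n : Int) (control : String) (out : Int) : Prop := out = solution_alt n control
instance (n : Int) (control : String) (out : Int) : Decidable (Spec_solution n control out) := by unfold Spec_solution; infer_instance

-- ===== CLAIM (what is proved, stated in full; the proofs are below) =====
def Claim_equal_solution : Prop := ∀ (n : Int) (control : String), Dom_solution n control → Spec_solution n control (solution n control)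

-- ===== LEMMAS AND PROOFS =====

theorem go_count (c : Char) : ∀ (l : List Char) (acc : Nat),
    PySem.Chars.count.go [c] l.length l acc = acc + l.count c
  | [], acc => by simp [PySem.Chars.count.go]
  | h :: t, acc => by
    simp only [List.length_cons, PySem.Chars.count.go, List.isPrefixOf, List.count_cons]
    by_cases hh : c = h
    · subst hh; simp [go_count c t (acc + 1)]; omega
    · have : (c == h) = false := by simp [hh]
      simp [this, Ne.symm hh, go_count c t acc]

theorem count_single (l : List Char) (c : Char) : PySem.Chars.count l [c] = l.count c := by
  simp [PySem.Chars.count, go_count]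

theorem loop_closed (l : List Char) (acc : Int) :
    l.foldl
      (fun answer i =>
        if 'w' = i then answer + 1
        else if 's' = i then answer + (-1)
        else if 'd' = i then answer + 10
        else answer + (-10)) acc
    = acc + (l.count 'w' : Int) - (l.count 's' : Int) + 10 * (l.count 'd' : Int)
        - 10 * ((l.length : Int) - (l.count 'w' : Int) - (l.count 's' : Int) - (l.count 'd' : Int)) := by
  induction l generalizing acc with
    | nil => simp
    | cons h t ih =>
      rw [List.foldl_cons, ih]
      simp only [List.count_cons, List.length_cons]
      by_cases hw : 'w' = h
      · subst hw; simp; push_cast; ring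
      · by_cases hs : 's' = h
        · subst hs; simp [hw]; push_cast; ring
        · by_cases hd : 'd' = h
          · subst hd; simp [hw, hs]; push_cast; ring
          · have bw : (h == 'w') = false := by simp [Ne.symm hw]
            have bs : (h == 's') = false := by simp [Ne.symm hs]
            have bd : (h == 'd') = false := by simp [Ne.symm hd]
            simp [hw, hs, hd, bw, bs, bd]; push_cast; ring

-- ===== VERDICT (by name: the statement is the Claim_ definition above) =====
theorem solution_spec : Claim_equal_solution := by
  intro n control _
  unfold Spec_solution solution solution_alt
  simp only [PySem.Str.count, PySem.Str.len_eq, loop_closed]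
  have : ("w" : String).toList = ['w'] ∧ ("s" : String).toList = ['s'] ∧ ("d" : String).toList = ['d'] := by decide
  rw [this.1, this.2.1, this.2.2]
  simp [count_single]
  ring
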